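-- pv_equiv track=rewrite | github.com/JK8789/thesis-apk-study | scripts/third_party_libs/legacy/extract_libraries.py | match_prefixes
-- ===== SOURCE A (Python) =====
-- from typing import Dict, Iterable, List, Set, Tuple
--
-- IGNORE_PREFIXES = (
--     "android.",
--     "androidx.",
--     "java.",
--     "javax.",
--     "kotlin.",
--     "kotlinx.",
--     "sun.",
--     "org.jetbrains.",
-- )
--
-- def match_prefixes(classes: Iterable[str], prefixes: List[str]) -> Dict[str, int]:
--     """
--     Count how many classes fall under each library prefix.
--     """
--     counts: Dict[str, int] = {}
--     for c in classes:
--         # Skip framework / standard libs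
--         if c.startswith(IGNORE_PREFIXES):
--             continue
--
--         # Find first matching library prefix (most specific due to sort)
--         for pref in prefixes:
--             if c.startswith(pref):
--                 counts[pref] = counts.get(pref, 0) + 1
--                 break
--     return counts
-- ===== SOURCE B (Python) =====
-- from typing import Dict, Iterable, List
--
-- IGNORE_PREFIXES = (
--     "android.",
--     "androidx.",
--     "java.",
--     "javax.",
--     "kotlin.",
--     "kotlinx.",
--     "sun.",
--     "org.jetbrains.",
-- )
--
-- def match_prefixes(classes: Iterable[str], prefixes: List[str]) -> Dict[str, int]:
--     """
--     Count how many classes fall under each library prefix.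
--
--     Instead of scanning the whole prefix list per class, build a hash index
--     prefix -> first position once, then probe each class's own prefixes.
--     """
--     index: Dict[str, int] = {}
--     for i, p in enumerate(prefixes):
--         if p not in index:
--             index[p] = i
--
--     counts: Dict[str, int] = {}
--     for c in classes:
--         if c.startswith(IGNORE_PREFIXES):
--             continue
--         best = None  # (first position, prefix string) of best match so far
--         for j in range(len(c) + 1):
--             p = c[:j]
--             k = index.get(p)
--             if k is not None and (best is None or k < best[0]):
--                 best = (k, p)
--         if best is not None:
--             pref = best[1]
--             counts[pref] = counts.get(pref, 0) + 1
--     return counts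
-- ===== Notes on version B (the rewrite author's own statement) =====
-- stated objective: faster
-- what changed: Instead of scanning the whole prefix list for every class, B builds a hash index prefix -> first position once and, for each class, probes only the class's own len(c)+1 prefixes, keeping the minimum-position hit.
import Mathlib
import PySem

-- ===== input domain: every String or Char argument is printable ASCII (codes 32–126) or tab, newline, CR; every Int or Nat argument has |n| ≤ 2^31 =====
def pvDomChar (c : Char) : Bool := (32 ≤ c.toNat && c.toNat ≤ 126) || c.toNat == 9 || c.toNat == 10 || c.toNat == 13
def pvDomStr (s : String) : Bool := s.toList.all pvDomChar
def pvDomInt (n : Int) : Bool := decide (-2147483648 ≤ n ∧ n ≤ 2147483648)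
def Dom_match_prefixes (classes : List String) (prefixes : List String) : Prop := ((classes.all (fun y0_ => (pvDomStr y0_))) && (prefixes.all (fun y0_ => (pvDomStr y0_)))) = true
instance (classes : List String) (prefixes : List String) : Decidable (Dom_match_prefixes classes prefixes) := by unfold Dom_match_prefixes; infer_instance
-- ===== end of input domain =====

-- B replaces the inner scan over the whole prefix list per class by a hash index
-- prefix → first position, probing each class's own prefixes instead (objective: faster
-- when the prefix list is long); the returned association list is proved identical.

-- module-level constant IGNORE_PREFIXES (used by both versions)
def ignorePrefixes : List String :=
  ["android.", "androidx.", "java.", "javax.", "kotlin.", "kotlinx.", "sun.", "org.jetbrains."]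

-- c.startswith(tuple): true iff some component matches (both versions call it)
def startswithAny (c : String) (ps : List String) : Bool :=
  ps.any (fun p => PySem.Str.startswith c p)

-- ===== PORT A =====
-- inner 'for pref in prefixes: … break': first prefix of the list that matches
def firstMatch (c : String) : List String → Option String
  | [] => none
  | p :: ps => if PySem.Str.startswith c p then some p else firstMatch c ps

def match_prefixes (classes : List String) (prefixes : List String) : List (String × Int) :=
  (classes.foldl (fun counts c =>
      if startswithAny c ignorePrefixes then counts
      else
        match firstMatch c prefixes with
        | none => counts
        | some pref => counts.insert pref (counts.getD pref 0 + 1))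
    PySem.Dict.empty).items

-- ===== PORT B =====
-- index: prefix → first position (for i, p in enumerate(prefixes): if p not in index: index[p] = i)
def buildIndex (prefixes : List String) : PySem.Dict String Int :=
  (PySem.List.enumerate prefixes).foldl
    (fun d ip => if d.contains ip.2 then d else d.insert ip.2 ip.1) PySem.Dict.empty

-- best = None; for j in range(len(c)+1): p = c[:j]; k = index.get(p);
--   if k is not None and (best is None or k < best[0]): best = (k, p)
def bestFor (index : PySem.Dict String Int) (c : String) : Option (Int × String) :=
  (PySem.List.pyRange 0 (PySem.Str.len c + 1) 1).foldl
    (fun best j =>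
      let p := PySem.Str.slice c none (some j)
      match PySem.Dict.get? index p with
      | none => best
      | some k =>
        match best with
        | none => some (k, p)
        | some b => if k < b.1 then some (k, p) else best)
    none

def match_prefixes_alt (classes : List String) (prefixes : List String) : List (String × Int) :=
  let index := buildIndex prefixes
  (classes.foldl (fun counts c =>
      if startswithAny c ignorePrefixes then counts
      else
        match bestFor index c with
        | none => counts
        | some b => counts.insert b.2 (counts.getD b.2 0 + 1))
    PySem.Dict.empty).items

-- ===== PRECONDITION & SPEC =====
def Spec_match_prefixes (classes : List String) (prefixes : List String) (out : List (String × Int)) : Prop := out = match_prefixes_alt classes prefixes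
instance (classes : List String) (prefixes : List String) (out : List (String × Int)) : Decidable (Spec_match_prefixes classes prefixes out) := by unfold Spec_match_prefixes; infer_instance

-- ===== CLAIM (what is proved, stated in full; the proofs are below) =====
def Claim_equal_match_prefixes : Prop := ∀ (classes : List String) (prefixes : List String), Dom_match_prefixes classes prefixes → Spec_match_prefixes classes prefixes (match_prefixes classes prefixes)

-- ===== LEMMAS AND PROOFS =====

-- A's inner loop is the findIdx?-indexed first match
theorem firstMatch_eq (c : String) (l : List String) :
    firstMatch c l = (l.findIdx? (fun p => PySem.Str.startswith c p)).bind (fun i => l[i]?) := by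
  induction l with
  | nil => simp [firstMatch]
  | cons q t ih =>
    by_cases h : PySem.Str.startswith c q = true <;>
      [skip; skip] <;> simp only [PySem.Str.startswith_eq] at h
    · simp [firstMatch, h, List.findIdx?_cons]
    · simp only [firstMatch, List.findIdx?_cons, ih]
      rw [if_neg (by simpa using h), if_neg (by simpa using h)]
      cases hfi : t.findIdx? (fun p => PySem.Str.startswith c p) <;> simp_all

-- the fold in bestFor, over an already-materialised candidate list
def minFold (l : List (Int × String)) (b : Option (Int × String)) : Option (Int × String) :=
  l.foldl (fun best kp =>
    match best with
    | none => some kp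
    | some b => if kp.1 < b.1 then some kp else best) b

theorem minFold_keeps (l : List (Int × String)) (k0 : Int) (p0 : String)
    (h : ∀ q ∈ l, q = (k0, p0) ∨ k0 < q.1) :
    minFold l (some (k0, p0)) = some (k0, p0) := by
  induction l with
  | nil => rfl
  | cons q t ih =>
    have hq := h q (List.mem_cons_self ..)
    have hrest : ∀ q ∈ t, q = (k0, p0) ∨ k0 < q.1 := fun r hr => h r (List.mem_cons_of_mem _ hr)
    have hnot : ¬ q.1 < k0 := by rcases hq with rfl | hlt; exacts [by simp, by omega]
    simpa [minFold, hnot] using ih hrest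

theorem minFold_attains (l : List (Int × String)) (k0 : Int) (p0 : String)
    (hmem : (k0, p0) ∈ l) (h : ∀ q ∈ l, q = (k0, p0) ∨ k0 < q.1)
    (b : Option (Int × String)) (hb : b = none ∨ ∃ b0, b = some b0 ∧ k0 < b0.1) :
    minFold l b = some (k0, p0) := by
  induction l generalizing b with
  | nil => simp at hmem
  | cons q t ih =>
    have hrest : ∀ r ∈ t, r = (k0, p0) ∨ k0 < r.1 := fun r hr => h r (List.mem_cons_of_mem _ hr)
    by_cases hq : q = (k0, p0)
    · subst hq
      rcases hb with rfl | ⟨b0, rfl, hltb⟩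
      · exact minFold_keeps t k0 p0 hrest
      · simpa [minFold, hltb] using minFold_keeps t k0 p0 hrest
    · have hmem' : (k0, p0) ∈ t := by
        rcases List.mem_cons.1 hmem with h1 | h1
        · exact absurd h1.symm hq
        · exact h1
      have hlt : k0 < q.1 := by
        rcases h q (List.mem_cons_self ..) with h1 | h1
        · exact absurd h1 hq
        · exact h1
      rcases hb with rfl | ⟨b0, rfl, hltb⟩
      · exact ih hmem' hrest (some q) (Or.inr ⟨q, rfl, hlt⟩)
      · by_cases hc : q.1 < b0.1
        · simpa [minFold, hc] using ih hmem' hrest (some q) (Or.inr ⟨q, rfl, hlt⟩)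
        · simpa [minFold, hc] using ih hmem' hrest (some b0) (Or.inr ⟨b0, rfl, hltb⟩)

-- B's index dictionary maps p to the FIRST position of p in the prefix list
theorem buildIndex_go (l : List String) (s : Int) (d : PySem.Dict String Int) (p : String) :
    ((PySem.List.enumerate l s).foldl
      (fun d ip => if d.contains ip.2 then d else d.insert ip.2 ip.1) d).get? p =
    match d.get? p with
    | some v => some v
    | none => (l.findIdx? (fun q => q == p)).map (fun n => s + n) := by
  induction l generalizing s d with
  | nil => simp [PySem.List.enumerate_nil]; cases d.get? p <;> simp
  | cons q l ih =>
    rw [PySem.List.enumerate_cons, List.foldl_cons, ih]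
    by_cases hc : d.contains q = true
    · simp only [hc, if_true]
      cases hdp : d.get? p with
      | some v => simp
      | none =>
        have hqp : q ≠ p := by
          intro h; subst h
          rw [PySem.Dict.contains_eq_isSome_get?, hdp] at hc; simp at hc
        simp only [List.findIdx?_cons, beq_iff_eq, hqp, if_false]
        cases hfi : List.findIdx? (fun q => q == p) l <;> simp; ring
    · simp only [hc, Bool.false_eq_true, if_false]
      by_cases hqp : q = p
      · subst hqp
        have h1 : (d.insert q s).get? q = some s := PySem.Dict.get?_insert_self d q s
        have hdp : d.get? q = none := by
          rw [PySem.Dict.contains_eq_isSome_get?] at hc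
          cases h : d.get? q <;> simp [h] at hc ⊢
        rw [h1]
        simp [hdp, List.findIdx?_cons]
      · have h1 : (d.insert q s).get? p = d.get? p := PySem.Dict.get?_insert_of_ne d s (Ne.symm hqp)
        simp only [h1]
        cases hdp : d.get? p with
        | some v => simp
        | none =>
          simp only [List.findIdx?_cons, beq_iff_eq, hqp, if_false]
          cases hfi : List.findIdx? (fun q => q == p) l <;> simp; ring

theorem buildIndex_spec (prefixes : List String) (p : String) :
    (buildIndex prefixes).get? p =
      (prefixes.findIdx? (fun q => q == p)).map (fun n => (n : Int)) := by
  unfold buildIndex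
  rw [buildIndex_go]
  cases hfi : prefixes.findIdx? (fun q => q == p) <;> simp [PySem.Dict.get?_empty]

theorem foldl_G_eq_minFold (G : Int → Option (Int × String)) (js : List Int)
    (b : Option (Int × String)) :
    js.foldl (fun best j =>
      match G j with
      | none => best
      | some kp =>
        match best with
        | none => some kp
        | some b0 => if kp.1 < b0.1 then some kp else best) b
    = minFold (js.filterMap G) b := by
  induction js generalizing b with
  | nil => rfl
  | cons j t ih =>
    cases hg : G j with
    | none => simpa [List.filterMap_cons, hg] using ih _
    | some kp => simpa [List.filterMap_cons, hg, minFold] using ih _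

theorem toList_slice_take (c : String) (j : Nat) :
    (PySem.Str.slice c none (some (j : Int))).toList = c.toList.take j := by
  rw [PySem.Str.toList_slice, PySem.Chars.slice_eq_listSlice, PySem.List.slice_to_natCast]

theorem bestFor_eq_minFold (index : PySem.Dict String Int) (c : String) :
    bestFor index c =
      minFold ((List.range (c.toList.length + 1)).filterMap (fun (j : Nat) =>
        (index.get? (PySem.Str.slice c none (some (j : Int)))).map
          (fun k => (k, PySem.Str.slice c none (some (j : Int)))))) none := by
  unfold bestFor
  have hlen : PySem.Str.len c + 1 = ((c.toList.length + 1 : Nat) : Int) := by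
    simp [PySem.Str.len_eq]
  rw [hlen, PySem.List.pyRange_zero_natCast, List.foldl_map]
  have hstep : ∀ (best : Option (Int × String)) (j : Nat),
      (fun best (j : Int) =>
        let p := PySem.Str.slice c none (some j)
        match PySem.Dict.get? index p with
        | none => best
        | some k =>
          match best with
          | none => some (k, p)
          | some b => if k < b.1 then some (k, p) else best) best (j : Int)
      = (fun best (j : Int) =>
        match (index.get? (PySem.Str.slice c none (some j))).map
            (fun k => (k, PySem.Str.slice c none (some j))) with
        | none => best
        | some kp =>
          match best with
          | none => some kp
          | some b0 => if kp.1 < b0.1 then some kp else best) best (j : Int) := by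
    intro best j
    cases hg : index.get? (PySem.Str.slice c none (some (j : Int))) <;> simp [hg]
  calc (List.range (c.toList.length + 1)).foldl _ none
      = (List.range (c.toList.length + 1)).foldl (fun best (j : Nat) =>
          match (index.get? (PySem.Str.slice c none (some (j : Int)))).map
              (fun k => (k, PySem.Str.slice c none (some (j : Int)))) with
          | none => best
          | some kp =>
            match best with
            | none => some kp
            | some b0 => if kp.1 < b0.1 then some kp else best) none :=
        List.foldl_ext _ _ _ (fun b j _ => hstep b j)
    _ = _ := by
        have hfm2 : ((List.range (c.toList.length + 1)).filterMap (fun (j : Nat) =>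
            (index.get? (PySem.Str.slice c none (some (j : Int)))).map
              (fun k => (k, PySem.Str.slice c none (some (j : Int))))))
          = (((List.range (c.toList.length + 1)).map (fun j : Nat => (j : Int))).filterMap
              (fun j => (index.get? (PySem.Str.slice c none (some j))).map
                (fun k => (k, PySem.Str.slice c none (some j))))) := by
          exact (List.filterMap_map
            (g := fun j : Int => (index.get? (PySem.Str.slice c none (some j))).map
              (fun k => (k, PySem.Str.slice c none (some j))))
            (f := fun j : Nat => (j : Int))
            (l := List.range (c.toList.length + 1))).symm
        rw [hfm2, ← foldl_G_eq_minFold, List.foldl_map]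

-- the key pointwise fact: B's chosen prefix is A's chosen prefix
theorem bestFor_spec (prefixes : List String) (c : String) :
    (bestFor (buildIndex prefixes) c).map (fun b => b.2) = firstMatch c prefixes := by
  rw [firstMatch_eq, bestFor_eq_minFold]
  have hslice : ∀ j : Nat, (PySem.Str.slice c none (some (j : Int))).toList = c.toList.take j :=
    toList_slice_take c
  -- a dict hit at c[:j] names a prefix of c that matches, at its first position
  have hhit : ∀ (j : Nat) (k : Int),
      (buildIndex prefixes).get? (PySem.Str.slice c none (some (j : Int))) = some k →
      ∃ m : Nat, k = (m : Int) ∧ m < prefixes.length ∧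
        prefixes[m]! = PySem.Str.slice c none (some (j : Int)) ∧
        PySem.Str.startswith c (prefixes[m]!) = true ∧
        ∀ i : Nat, i < m → prefixes[i]! ≠ PySem.Str.slice c none (some (j : Int)) := by
    intro j k hk
    rw [buildIndex_spec] at hk
    cases hfi : prefixes.findIdx? (fun q => q == PySem.Str.slice c none (some (j : Int))) with
    | none => rw [hfi] at hk; simp at hk
    | some m =>
      rw [hfi] at hk
      obtain ⟨hm, hpm, hmin⟩ := List.findIdx?_eq_some_iff_getElem.1 hfi
      have hkm : k = (m : Int) := by simpa using hk.symm
      have heq : prefixes[m] = PySem.Str.slice c none (some (j : Int)) := by simpa using hpm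
      refine ⟨m, hkm, hm, ?_, ?_, ?_⟩
      · simp [List.getElem!_eq_getElem?_getD, List.getElem?_eq_getElem hm, heq]
      · rw [List.getElem!_eq_getElem?_getD, List.getElem?_eq_getElem hm]
        simp only [Option.getD_some]
        rw [PySem.Str.startswith_eq]
        rw [PySem.Chars.startswith_iff, heq, hslice]
        exact List.take_prefix _ _
      · intro i hi
        have := hmin i hi
        rw [List.getElem!_eq_getElem?_getD, List.getElem?_eq_getElem (by omega)]
        simpa using this
  cases hfi : prefixes.findIdx? (fun p => PySem.Str.startswith c p) with
  | none =>
    have hall : ∀ p ∈ prefixes, PySem.Str.startswith c p = false := by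
      have := List.findIdx?_eq_none_iff.1 hfi
      intro p hp; exact this p hp
    have hcands : ((List.range (c.toList.length + 1)).filterMap (fun (j : Nat) =>
        ((buildIndex prefixes).get? (PySem.Str.slice c none (some (j : Int)))).map
          (fun k => (k, PySem.Str.slice c none (some (j : Int)))))) = [] := by
      rw [List.filterMap_eq_nil_iff]
      intro j hj
      cases hg : (buildIndex prefixes).get? (PySem.Str.slice c none (some (j : Int))) with
      | none => simp
      | some k =>
        exfalso
        obtain ⟨m, _, hm, _, hsw, _⟩ := hhit j k hg
        have : prefixes[m]! ∈ prefixes := by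
          rw [List.getElem!_eq_getElem?_getD, List.getElem?_eq_getElem hm]
          exact List.getElem_mem hm
        rw [hall _ this] at hsw; exact Bool.false_ne_true hsw
    rw [hcands]; rfl
  | some i0 =>
    obtain ⟨hlen, hpred, hmin⟩ := List.findIdx?_eq_some_iff_getElem.1 hfi
    have hp0pre : (prefixes[i0]).toList <+: c.toList := by
      rw [← PySem.Chars.startswith_iff, ← PySem.Str.startswith_eq]; exact hpred
    have hj0le : (prefixes[i0]).toList.length ≤ c.toList.length := hp0pre.length_le
    have hslice0 : PySem.Str.slice c none (some (((prefixes[i0]).toList.length : Nat) : Int))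
        = prefixes[i0] := by
      rw [← String.toList_inj, hslice]
      exact (List.prefix_iff_eq_take.1 hp0pre).symm
    have hidx0 : (buildIndex prefixes).get? (prefixes[i0]) = some (i0 : Int) := by
      rw [buildIndex_spec]
      have : prefixes.findIdx? (fun q => q == prefixes[i0]) = some i0 := by
        rw [List.findIdx?_eq_some_iff_getElem]
        refine ⟨hlen, by simp, ?_⟩
        intro m hm hq
        have hqe : prefixes[m] = prefixes[i0] := by simpa using hq
        exact hmin m hm (by rw [hqe]; exact hpred)
      rw [this]; simp
    set G := fun (j : Nat) =>
        ((buildIndex prefixes).get? (PySem.Str.slice c none (some (j : Int)))).map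
          (fun k => (k, PySem.Str.slice c none (some (j : Int)))) with hGdef
    have hmem : ((i0 : Int), prefixes[i0]) ∈ (List.range (c.toList.length + 1)).filterMap G := by
      refine List.mem_filterMap.2 ⟨(prefixes[i0]).toList.length, ?_, ?_⟩
      · exact List.mem_range.2 (by omega)
      · rw [hGdef]; simp only []
        rw [hslice0, hidx0]; rfl
    have hall : ∀ q ∈ (List.range (c.toList.length + 1)).filterMap G,
        q = ((i0 : Int), prefixes[i0]) ∨ (i0 : Int) < q.1 := by
      intro q hq
      obtain ⟨j, hjr, hgj⟩ := List.mem_filterMap.1 hq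
      rw [hGdef] at hgj; simp only [] at hgj
      cases hg : (buildIndex prefixes).get? (PySem.Str.slice c none (some (j : Int))) with
      | none => rw [hg] at hgj; simp at hgj
      | some k =>
        rw [hg] at hgj
        have hqv : q = (k, PySem.Str.slice c none (some (j : Int))) := by simpa using hgj.symm
        obtain ⟨m, hkm, hm, hpm, hsw, _⟩ := hhit j k hg
        have hnotlt : ¬ m < i0 := by
          intro hlt
          have := hmin m hlt
          rw [List.getElem!_eq_getElem?_getD, List.getElem?_eq_getElem hm] at hsw
          simp only [Option.getD_some] at hsw
          exact this hsw
        by_cases hmi : m = i0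
        · subst hmi
          left
          rw [List.getElem!_eq_getElem?_getD, List.getElem?_eq_getElem hm] at hpm
          simp only [Option.getD_some] at hpm
          rw [hqv, hkm, hpm]
        · right
          rw [hqv, hkm]
          simp only []
          have : i0 < m := by omega
          exact_mod_cast this
    rw [minFold_attains _ _ _ hmem hall none (Or.inl rfl)]
    simp [List.getElem?_eq_getElem hlen]

-- ===== VERDICT (by name: the statement is the Claim_ definition above) =====
theorem match_prefixes_spec : Claim_equal_match_prefixes := by
  intro classes prefixes _
  unfold Spec_match_prefixes match_prefixes match_prefixes_alt
  congr 1
  apply List.foldl_ext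
  intro counts c _
  by_cases hig : startswithAny c ignorePrefixes <;> simp only [hig, if_true]
  have h := bestFor_spec prefixes c
  cases hb : bestFor (buildIndex prefixes) c with
  | none => rw [hb] at h; simp at h; rw [← h]
  | some b => rw [hb] at h; simp at h; rw [← h]
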